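-- pv_equiv track=rewrite | github.com/azwdevops/courzehub-coding-challenges | python/set9.py | all_palindromes
-- ===== SOURCE A (Python) =====
-- from collections import defaultdict, Counter, deque
--
-- def all_palindromes(s):
--     # Code here
--     freq = Counter(s)
--     odd_char = ""
--     half = []
--
--     for key, value in freq.items():
--         if value % 2 == 1:
--             if odd_char:
--                 return []
--             odd_char = key
--         half.extend([key] * (value // 2))
--
--     half.sort()
--     result = []
--     used = [False] * len(half)
--
--     def backtrack(path):
--         if len(path) == len(half):
--             half_str = "".join(path)
--             full_palidrome = half_str + odd_char + half_str[::-1]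
--             result.append(full_palidrome[:])
--             return
--
--         for i in range(len(half)):
--             if used[i]:
--                 continue
--             if i > 0 and half[i] == half[i - 1] and not used[i - 1]:
--                 continue
--             used[i] = True
--             path.append(half[i])
--             backtrack(path)
--             path.pop()
--             used[i] = False
--
--     backtrack([])
--
--     return result
-- ===== SOURCE B (Python) =====
-- from collections import Counter
--
-- def all_palindromes(s):
--     freq = Counter(s)
--     odds = [k for k, v in freq.items() if v % 2 == 1]
--     if len(odds) > 1:
--         return []
--     odd = odds[0] if odds else ""
--     half = "".join(sorted("".join(k * (v // 2) for k, v in freq.items())))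
--
--     def halves(chars):
--         if not chars:
--             return [""]
--         out = []
--         prev = None
--         for c in chars:
--             if prev == c:
--                 continue
--             prev = c
--             rest = chars.replace(c, "", 1)
--             for t in halves(rest):
--                 out.append(c + t)
--         return out
--
--     return [h + odd + h[::-1] for h in halves(half)]
-- ===== Notes on version B (the rewrite author's own statement) =====
-- stated objective: alternative
-- what changed: A's used[]-flag backtracking over positions of the sorted half (with the 'skip if same as previous unused index' rule) is replaced by a direct recursion on the remaining multiset of characters: at each level iterate over the sorted remainder skipping consecutive duplicates, remove the chosen character's first occurrence and recurse, building each half front-to-back; odd-character detection becomes a filter over the Counter items.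
import Mathlib
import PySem

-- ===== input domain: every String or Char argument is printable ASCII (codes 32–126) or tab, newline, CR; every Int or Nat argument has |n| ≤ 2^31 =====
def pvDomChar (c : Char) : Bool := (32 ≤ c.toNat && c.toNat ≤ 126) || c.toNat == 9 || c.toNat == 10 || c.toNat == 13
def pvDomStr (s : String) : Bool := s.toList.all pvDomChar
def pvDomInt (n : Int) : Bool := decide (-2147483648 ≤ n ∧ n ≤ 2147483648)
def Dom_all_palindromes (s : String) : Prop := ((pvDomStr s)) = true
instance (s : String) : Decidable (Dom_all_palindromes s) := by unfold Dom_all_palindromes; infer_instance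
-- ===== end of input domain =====

-- B replaces A's used[]-array backtracking over positions by a recursion on the remaining
-- multiset of characters (skip-equal-to-previous over the sorted remainder); objective: alternative.

-- ===== PORT A =====
-- the `for key, value in freq.items()` loop of A: computes (odd_char, half); none = early `return []`
def oddHalfA : List (Char × Int) → List Char → List Char → Option (List Char × List Char)
  | [], odd, half => some (odd, half)
  | (k, v) :: rest, odd, half =>
    if PySem.Int.mod v 2 = 1 then
      if odd ≠ [] then none
      else oddHalfA rest [k] (half ++ PySem.List.pyRepeat [k] (PySem.Int.floordiv v 2))
    else oddHalfA rest odd (half ++ PySem.List.pyRepeat [k] (PySem.Int.floordiv v 2))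

-- `backtrack`; fuel is only a totality guard (callers pass fuel > number of unused slots,
-- so the `0` branch is never taken); indices i, i-1 are always in range, so getD is exact.
def btA (half odd : List Char) : Nat → List Bool → List Char → List String
  | 0, _, path =>
    if path.length = half.length then [String.ofList (path ++ odd ++ path.reverse)] else []
  | fuel' + 1, used, path =>
    if path.length = half.length then [String.ofList (path ++ odd ++ path.reverse)]
    else
      (List.range half.length).foldl (fun acc i =>
        if used.getD i false then acc
        else if 0 < i ∧ half.getD i ' ' = half.getD (i - 1) ' ' ∧ used.getD (i - 1) false = false then acc
        else acc ++ btA half odd fuel' (used.set i true) (path ++ [half.getD i ' '])) []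

def all_palindromes (s : String) : List String :=
  let freq := PySem.Dict.counter s.toList
  match oddHalfA freq.items [] [] with
  | none => []
  | some (odd, half0) =>
    let half := PySem.List.sorted half0 (fun c => c) false
    btA half odd (half.length + 1) (List.replicate half.length false) []

-- ===== PORT B =====
-- `halves(chars)`: recursion on the remaining sorted multiset; the fold carries (prev, out);
-- fuel is only a totality guard (callers pass fuel > length, so the `0` branch is never taken).
def genB : Nat → List Char → List (List Char)
  | 0, m => if m = [] then [[]] else []
  | fuel' + 1, m =>
    if m = [] then [[]]
    else
      (m.foldl (fun st c =>
          if st.1 = some c then st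
          else (some c, st.2 ++ (genB fuel' (m.erase c)).map (fun t => c :: t)))
        ((none : Option Char), ([] : List (List Char)))).2

def all_palindromes_alt (s : String) : List String :=
  let freq := PySem.Dict.counter s.toList
  let odds := (freq.items.filter (fun kv => decide (PySem.Int.mod kv.2 2 = 1))).map Prod.fst
  if 1 < odds.length then []
  else
    let odd := odds.take 1   -- odds[0] if odds else ""
    let half := PySem.List.sorted
      (freq.items.flatMap (fun kv => PySem.List.pyRepeat [kv.1] (PySem.Int.floordiv kv.2 2)))
      (fun c => c) false
    (genB (half.length + 1) half).map (fun h => String.ofList (h ++ odd ++ h.reverse))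

-- ===== PRECONDITION & SPEC =====
def Spec_all_palindromes (s : String) (out : List String) : Prop := out = all_palindromes_alt s
instance (s : String) (out : List String) : Decidable (Spec_all_palindromes s out) := by unfold Spec_all_palindromes; infer_instance

-- ===== CLAIM (what is proved, stated in full; the proofs are below) =====
def Claim_equal_all_palindromes : Prop := ∀ (s : String), Dom_all_palindromes s → Spec_all_palindromes s (all_palindromes s)

-- ===== LEMMAS AND PROOFS =====

-- the characters of `half` that are still unused
def unusedL (half : List Char) (used : List Bool) : List Char :=
  ((half.zip used).filter (fun p => !p.2)).map Prod.fst

-- the characters B's fold keeps (first of each run of equal characters, given the previous char)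
def keptChars : Option Char → List Char → List Char
  | _, [] => []
  | p, c :: r => if p = some c then keptChars p r else c :: keptChars (some c) r

-- A's reachable used-states: within equal characters, used indices come first
def InvA (half : List Char) (used : List Bool) : Prop :=
  ∀ i j, i < j → j < half.length → half.getD i ' ' = half.getD j ' ' →
    used.getD j false = true → used.getD i false = true

lemma unusedL_cons (c : Char) (b : Bool) (h : List Char) (u : List Bool) :
    unusedL (c :: h) (b :: u) = (if b then [] else [c]) ++ unusedL h u := by
  cases b <;> simp [unusedL]

lemma unusedL_append (h1 h2 : List Char) (u1 u2 : List Bool) (hl : h1.length = u1.length) :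
    unusedL (h1 ++ h2) (u1 ++ u2) = unusedL h1 u1 ++ unusedL h2 u2 := by
  simp [unusedL, List.zip_append hl]

lemma unusedL_sublist (h : List Char) (u : List Bool) : (unusedL h u).Sublist h := by
  induction h generalizing u with
  | nil => simp [unusedL]
  | cons c t ih =>
    cases u with
    | nil => simp [unusedL]
    | cons b ub =>
      rw [unusedL_cons]
      cases b
      · simpa using List.Sublist.cons₂ c (ih ub)
      · simpa using List.Sublist.cons c (ih ub)

lemma mem_unusedL {c : Char} {h : List Char} {u : List Bool} (hl : u.length = h.length) :
    c ∈ unusedL h u ↔ ∃ i, i < h.length ∧ h.getD i ' ' = c ∧ u.getD i false = false := by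
  induction h generalizing u with
  | nil => simp [unusedL]
  | cons a t ih =>
    cases u with
    | nil => simp at hl
    | cons b ub =>
      have hl' : ub.length = t.length := by simpa using hl
      rw [unusedL_cons]
      constructor
      · intro hc
        rcases List.mem_append.mp hc with hc | hc
        · cases b with
          | true => simp at hc
          | false =>
            simp at hc
            exact ⟨0, by simp, by simp [hc], by simp⟩
        · obtain ⟨i, hi, hg, hu⟩ := (ih hl').mp hc
          exact ⟨i + 1, by simp; omega, by simpa using hg, by simpa using hu⟩
      · rintro ⟨i, hi, hg, hu⟩
        cases i with
        | zero =>
          simp at hg hu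
          subst hg hu
          simp
        | succ i =>
          simp at hg hu
          exact List.mem_append.mpr (Or.inr ((ih hl').mpr ⟨i, by simp at hi; omega, hg, hu⟩))

lemma unusedL_replicate_false (h : List Char) :
    unusedL h (List.replicate h.length false) = h := by
  induction h with
  | nil => rfl
  | cons c t ih => simp [List.replicate_succ, unusedL_cons, ih]

-- B's fold with (prev, out) accumulator, flattened
lemma foldl_prev_eq_keptChars (F : Char → List (List Char)) :
    ∀ (l : List Char) (p : Option Char) (acc : List (List Char)),
    (l.foldl (fun st c => if st.1 = some c then st else (some c, st.2 ++ F c)) (p, acc)).2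
      = acc ++ (keptChars p l).flatMap F := by
  intro l
  induction l with
  | nil => intro p acc; simp [keptChars]
  | cons c r ih =>
    intro p acc
    by_cases hp : p = some c
    · simp [keptChars, hp, ih]
    · simp [keptChars, hp, ih, List.append_assoc]

-- the elements of a sorted list are ≤ its last element
lemma sorted_mem_getLast? {l : List Char} (hs : l.Pairwise (· ≤ ·)) {c : Char}
    (hc : c ∈ l) (hub : ∀ x ∈ l, x ≤ c) : l.getLast? = some c := by
  have hne : l ≠ [] := by rintro rfl; simp at hc
  rw [List.getLast?_eq_some_getLast hne]
  have h1 : l.getLast hne ≤ c := hub _ (List.getLast_mem hne)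
  have h2 : c ≤ l.getLast hne := by
    obtain ⟨i, hi, rfl⟩ := List.mem_iff_getElem.mp hc
    rw [List.getLast_eq_getElem]
    rcases Nat.lt_or_ge i (l.length - 1) with h | h
    · exact List.pairwise_iff_getElem.mp hs i (l.length - 1) hi (by omega) h
    · have : i = l.length - 1 := by omega
      subst this
      exact le_refl _
  rw [le_antisymm h1 h2]

-- ERASE: removing the first unused occurrence of half[j] (j minimal for its char)
lemma unusedL_set {half : List Char} {used : List Bool} {j : Nat}
    (hj : j < half.length) (hl : used.length = half.length) :
    unusedL half (used.set j true)
      = unusedL (half.take j) (used.take j) ++ unusedL (half.drop (j+1)) (used.drop (j+1)) := by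
  have hjl : j < used.length := by omega
  have e1 : half = half.take j ++ half[j] :: half.drop (j+1) := by
    conv_lhs => rw [← List.take_append_drop j half, List.drop_eq_getElem_cons hj]
  have e2 : used.set j true = used.take j ++ true :: used.drop (j+1) :=
    List.set_eq_take_cons_drop true hjl
  calc unusedL half (used.set j true)
      = unusedL (half.take j ++ half[j] :: half.drop (j+1))
          (used.take j ++ true :: used.drop (j+1)) := by rw [← e1, ← e2]
    _ = _ := by
        rw [unusedL_append _ _ _ _ (by simp; omega), unusedL_cons]
        simp

lemma unusedL_split {half : List Char} {used : List Bool} {j : Nat}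
    (hj : j < half.length) (hl : used.length = half.length) :
    unusedL half used
      = unusedL (half.take j) (used.take j)
        ++ (if used.getD j false then [] else [half.getD j ' '])
        ++ unusedL (half.drop (j+1)) (used.drop (j+1)) := by
  have hjl : j < used.length := by omega
  have e1 : half = half.take j ++ half[j] :: half.drop (j+1) := by
    conv_lhs => rw [← List.take_append_drop j half, List.drop_eq_getElem_cons hj]
  have e2 : used = used.take j ++ used[j] :: used.drop (j+1) := by
    conv_lhs => rw [← List.take_append_drop j used, List.drop_eq_getElem_cons hjl]
  conv_lhs => rw [e1, e2]
  rw [unusedL_append _ _ _ _ (by simp; omega), unusedL_cons]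
  rw [List.getD_eq_getElem _ _ hj, List.getD_eq_getElem _ _ hjl]
  simp

lemma mem_unusedL_take {half : List Char} {used : List Bool} {j : Nat} {x : Char}
    (hj : j ≤ half.length) (hl : used.length = half.length) :
    x ∈ unusedL (half.take j) (used.take j)
      ↔ ∃ i, i < j ∧ half.getD i ' ' = x ∧ used.getD i false = false := by
  rw [mem_unusedL (by simp [hl])]
  constructor
  · rintro ⟨i, hi, hg, hu⟩
    have hij : i < j := by simp at hi; omega
    have hih : i < half.length := by omega
    refine ⟨i, hij, ?_, ?_⟩
    · rw [← hg, List.getD_eq_getElem _ _ hi, List.getD_eq_getElem _ _ hih, List.getElem_take]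
    · rw [← hu, List.getD_eq_getElem _ _ (by simp; omega : i < (used.take j).length),
          List.getD_eq_getElem _ _ (by omega : i < used.length), List.getElem_take]
  · rintro ⟨i, hij, hg, hu⟩
    have hih : i < half.length := by omega
    refine ⟨i, by simp; omega, ?_, ?_⟩
    · rw [← hg, List.getD_eq_getElem _ _ (by simp; omega : i < (half.take j).length),
          List.getD_eq_getElem _ _ hih, List.getElem_take]
    · rw [← hu, List.getD_eq_getElem _ _ (by simp; omega : i < (used.take j).length),
          List.getD_eq_getElem _ _ (by omega : i < used.length), List.getElem_take]

-- the INNER loop correspondence: A's index scan with skip rules = keptChars over the unused suffix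
lemma inner_loop (half : List Char) (used : List Bool) (F : Nat → List String) (G : Char → List String)
    (hl : used.length = half.length) (hs : half.Pairwise (· ≤ ·)) (hinv : InvA half used)
    (hFG : ∀ j, j < half.length → used.getD j false = false →
          (∀ k, k < j → half.getD k ' ' = half.getD j ' ' → used.getD k false = true) →
          F j = G (half.getD j ' ')) :
    ∀ t j, j + t = half.length →
    (List.range' j t).flatMap (fun i =>
        if used.getD i false then []
        else if 0 < i ∧ half.getD i ' ' = half.getD (i - 1) ' ' ∧ used.getD (i - 1) false = false then []
        else F i)
      = (keptChars (unusedL (half.take j) (used.take j)).getLast?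
          (unusedL (half.drop j) (used.drop j))).flatMap G := by
  have hchain : ∀ i k, i < k → k < half.length → half.getD i ' ' ≤ half.getD k ' ' := by
    intro i k hik hk
    rw [List.getD_eq_getElem _ _ (by omega), List.getD_eq_getElem _ _ hk]
    exact List.pairwise_iff_getElem.mp hs i k (by omega) hk hik
  intro t
  induction t with
  | zero =>
    intro j hj
    rw [List.drop_eq_nil_of_le (by omega : half.length ≤ j),
        List.drop_eq_nil_of_le (by omega : used.length ≤ j)]
    simp [keptChars, unusedL]
  | succ t ih =>
    intro j hj
    have hjn : j < half.length := by omega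
    have hjl : j < used.length := by omega
    have hdh : half.drop j = half[j] :: half.drop (j+1) := List.drop_eq_getElem_cons hjn
    have hdu : used.drop j = used[j] :: used.drop (j+1) := List.drop_eq_getElem_cons hjl
    have hth : half.take (j+1) = half.take j ++ [half[j]] := by
      rw [List.take_add_one, List.getElem?_eq_getElem hjn]; rfl
    have htu : used.take (j+1) = used.take j ++ [used[j]] := by
      rw [List.take_add_one, List.getElem?_eq_getElem hjl]; rfl
    have hgd : half.getD j ' ' = half[j] := List.getD_eq_getElem _ _ hjn
    have hud : used.getD j false = used[j] := List.getD_eq_getElem _ _ hjl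
    have hlent : (half.take j).length = (used.take j).length := by simp [hl]
    rw [List.range'_succ]
    simp only [List.flatMap_cons]
    rw [hdh, hdu, unusedL_cons]
    cases hb : used[j] with
    | true =>
      rw [if_pos (by rw [hud, hb]), if_pos (show true = true from rfl)]
      have hP : unusedL (half.take (j+1)) (used.take (j+1)) = unusedL (half.take j) (used.take j) := by
        rw [hth, htu, unusedL_append _ _ _ _ hlent, hb, unusedL_cons]; simp [unusedL]
      have hIH := ih (j+1) (by omega)
      rw [hP] at hIH
      simpa using hIH
    | false =>
      rw [if_neg (by rw [hud, hb]; simp), if_neg (show ¬(false = true) by simp)]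
      have hP1 : unusedL (half.take (j+1)) (used.take (j+1))
          = unusedL (half.take j) (used.take j) ++ [half[j]] := by
        rw [hth, htu, unusedL_append _ _ _ _ hlent, hb, unusedL_cons]; simp [unusedL]
      have hlast1 : (unusedL (half.take (j+1)) (used.take (j+1))).getLast? = some half[j] := by
        rw [hP1, List.getLast?_concat]
      have hPsub : (unusedL (half.take j) (used.take j)).Sublist half :=
        (unusedL_sublist _ _).trans (List.take_sublist _ _)
      have hPsort : (unusedL (half.take j) (used.take j)).Pairwise (· ≤ ·) := hs.sublist hPsub
      have hub : ∀ x ∈ unusedL (half.take j) (used.take j), x ≤ half[j] := by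
        intro x hx
        obtain ⟨i, hij, hg, _⟩ := (mem_unusedL_take (by omega) hl).mp hx
        rw [← hg, ← hgd]
        exact hchain i j hij hjn
      have hIH := ih (j+1) (by omega)
      rw [hlast1] at hIH
      by_cases hlast : (unusedL (half.take j) (used.take j)).getLast? = some half[j]
      · -- an unused copy of half[j] sits just before j: both sides skip position j
        have hcP : half[j] ∈ unusedL (half.take j) (used.take j) := List.mem_of_getLast? hlast
        obtain ⟨i, hij, hgi, hui⟩ := (mem_unusedL_take (by omega) hl).mp hcP
        have hj1 : half.getD (j-1) ' ' = half[j] := by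
          have hle1 : half[j] ≤ half.getD (j-1) ' ' := by
            rcases Nat.eq_or_lt_of_le (by omega : i ≤ j-1) with he | hlt
            · rw [← he, hgi]
            · rw [← hgi]; exact hchain i (j-1) hlt (by omega)
          have hle2 : half.getD (j-1) ' ' ≤ half[j] := by
            rw [← hgd]; exact hchain (j-1) j (by omega) hjn
          exact le_antisymm hle2 hle1
        have huj1 : used.getD (j-1) false = false := by
          by_contra hu1
          have hu1' : used.getD (j-1) false = true := by
            cases h : used.getD (j-1) false
            · exact absurd h hu1
            · rfl
          rcases Nat.eq_or_lt_of_le (by omega : i ≤ j-1) with he | hlt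
          · rw [he] at hui; rw [hui] at hu1'; cases hu1'
          · have := hinv i (j-1) hlt (by omega) (by rw [hgi, hj1]) hu1'
            rw [hui] at this; cases this
        rw [if_pos ⟨by omega, by rw [hgd, hj1], huj1⟩]
        have hkc : keptChars (unusedL (half.take j) (used.take j)).getLast?
            ([half[j]] ++ unusedL (half.drop (j+1)) (used.drop (j+1)))
            = keptChars (some half[j]) (unusedL (half.drop (j+1)) (used.drop (j+1))) := by
          simp only [List.singleton_append, keptChars, if_pos hlast]
          rw [hlast]
        rw [hkc, ← hIH]
        simp
      · -- position j is the first unused occurrence of its character: both sides keep it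
        have hallow : ∀ k, k < j → half.getD k ' ' = half.getD j ' ' → used.getD k false = true := by
          intro k hk hck
          by_contra huk
          have huk' : used.getD k false = false := by
            cases h : used.getD k false
            · rfl
            · exact absurd h huk
          exact hlast (sorted_mem_getLast? hPsort
            ((mem_unusedL_take (by omega) hl).mpr ⟨k, hk, by rw [hck, hgd], huk'⟩) hub)
        have hnskip : ¬(0 < j ∧ half.getD j ' ' = half.getD (j-1) ' ' ∧ used.getD (j-1) false = false) := by
          rintro ⟨h0, hcj, huj⟩
          exact hlast (sorted_mem_getLast? hPsort
            ((mem_unusedL_take (by omega) hl).mpr ⟨j-1, by omega, by rw [← hcj, hgd], huj⟩) hub)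
        rw [if_neg hnskip]
        have hF := hFG j hjn (by rw [hud, hb]) hallow
        have hkc : keptChars (unusedL (half.take j) (used.take j)).getLast?
            ([half[j]] ++ unusedL (half.drop (j+1)) (used.drop (j+1)))
            = half[j] :: keptChars (some half[j]) (unusedL (half.drop (j+1)) (used.drop (j+1))) := by
          simp only [List.singleton_append, keptChars, if_neg hlast]
        rw [hkc, List.flatMap_cons, ← hIH, hF, hgd]

-- MAIN: A's backtracking from a reachable state = B's multiset recursion on the unused chars
lemma btA_eq_genB (odd : List Char) :
    ∀ k (half : List Char) (used : List Bool) (path : List Char) (fA fB : Nat),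
    (unusedL half used).length = k →
    half.Pairwise (· ≤ ·) →
    used.length = half.length →
    InvA half used →
    path.length + k = half.length →
    k ≤ fA → k ≤ fB →
    btA half odd fA used path
      = (genB fB (unusedL half used)).map
          (fun t => String.ofList ((path ++ t) ++ odd ++ (path ++ t).reverse)) := by
  intro k
  induction k using Nat.strong_induction_on with
  | _ k IH =>
    intro half used path fA fB hk hs hl hinv hlen hfA hfB
    cases k with
    | zero =>
      have hm : unusedL half used = [] := List.length_eq_zero_iff.mp hk
      have hp : path.length = half.length := by omega
      have hemit : btA half odd fA used path = [String.ofList (path ++ odd ++ path.reverse)] := by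
        cases fA <;> simp [btA, if_pos hp]
      have hgen : genB fB (unusedL half used) = [[]] := by
        rw [hm]; cases fB <;> simp [genB]
      rw [hemit, hgen]
      simp
    | succ k =>
      have hmne : unusedL half used ≠ [] := by
        intro h; rw [h] at hk; simp at hk
      have hp : ¬ path.length = half.length := by omega
      cases fA with
      | zero => omega
      | succ fA' =>
      cases fB with
      | zero => omega
      | succ fB' =>
      set m := unusedL half used with hmdef
      -- unfold A one step and flatten its loop
      rw [btA, if_neg hp]
      have hbody : (fun (acc : List String) (i : Nat) =>
            if used.getD i false then acc
            else if 0 < i ∧ half.getD i ' ' = half.getD (i - 1) ' ' ∧ used.getD (i - 1) false = false then acc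
            else acc ++ btA half odd fA' (used.set i true) (path ++ [half.getD i ' ']))
          = (fun acc i => acc ++
              (if used.getD i false then []
               else if 0 < i ∧ half.getD i ' ' = half.getD (i - 1) ' ' ∧ used.getD (i - 1) false = false then []
               else btA half odd fA' (used.set i true) (path ++ [half.getD i ' ']))) := by
        funext acc i
        split_ifs <;> simp
      rw [hbody, PySem.List.foldl_append_eq_flatMap, List.nil_append, List.range_eq_range']
      -- unfold B one step and flatten its loop
      rw [genB, if_neg hmne]
      rw [foldl_prev_eq_keptChars (fun c => (genB fB' (m.erase c)).map (fun t => c :: t))]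
      rw [List.nil_append, List.map_flatMap]
      -- each kept branch of A equals the corresponding branch of B (by the induction hypothesis)
      have hFGmain : ∀ j, j < half.length → used.getD j false = false →
          (∀ k', k' < j → half.getD k' ' ' = half.getD j ' ' → used.getD k' false = true) →
          btA half odd fA' (used.set j true) (path ++ [half.getD j ' '])
          = (fun c => ((genB fB' (m.erase c)).map (fun t => c :: t)).map
              (fun t => String.ofList ((path ++ t) ++ odd ++ (path ++ t).reverse))) (half.getD j ' ') := by
        intro j hjn huj hallow
        have hjl : j < used.length := by omega
        set c := half.getD j ' ' with hcdef
        have hcnotP : c ∉ unusedL (half.take j) (used.take j) := by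
          intro hmem
          obtain ⟨i, hij, hgi, hui⟩ := (mem_unusedL_take (by omega) hl).mp hmem
          have := hallow i hij hgi
          rw [hui] at this; cases this
        have hsplit := unusedL_split hjn hl
        rw [← hcdef, huj] at hsplit
        simp only [Bool.false_eq_true, if_false] at hsplit
        rw [← hmdef] at hsplit
        have herase : unusedL half (used.set j true) = m.erase c := by
          rw [unusedL_set hjn hl]
          rw [hsplit, List.append_assoc, List.singleton_append]
          rw [List.erase_append_right _ hcnotP, List.erase_cons_head]
        have hcm : c ∈ m := by rw [hsplit]; simp
        have hklen : (unusedL half (used.set j true)).length = k := by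
          rw [herase, List.length_erase_of_mem hcm, hk]
          omega
        have hsetD : ∀ i, i ≠ j → (used.set j true).getD i false = used.getD i false := by
          intro i hij
          by_cases hi : i < used.length
          · rw [List.getD_eq_getElem _ _ (by simpa using hi),
                List.getD_eq_getElem _ _ hi, List.getElem_set_ne (by omega)]
          · rw [List.getD_eq_default _ _ (by simpa using Nat.le_of_not_lt hi),
                List.getD_eq_default _ _ (by omega)]
        have hinv' : InvA half (used.set j true) := by
          intro i i' hii' hi'n hch hu'
          by_cases hi'j : i' = j
          · subst hi'j
            have hti : used.getD i false = true := hallow i hii' hch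
            rw [hsetD i (by omega), hti]
          · rw [hsetD i' hi'j] at hu'
            have hui : used.getD i false = true := hinv i i' hii' hi'n hch hu'
            by_cases hij : i = j
            · subst hij
              rw [huj] at hui; cases hui
            · rw [hsetD i hij, hui]
        have hF := IH k (by omega) half (used.set j true) (path ++ [c]) fA' fB'
          hklen hs (by simpa using hl) hinv' (by simp; omega) (by omega) (by omega)
        rw [herase] at hF
        rw [hF]
        simp only [List.map_map]
        apply List.map_congr_left
        intro t _
        simp only [Function.comp_apply, List.cons_append, List.append_assoc, List.nil_append]
      have hloop := inner_loop half used
        (fun i => btA half odd fA' (used.set i true) (path ++ [half.getD i ' ']))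
        (fun c => ((genB fB' (m.erase c)).map (fun t => c :: t)).map
            (fun t => String.ofList ((path ++ t) ++ odd ++ (path ++ t).reverse)))
        hl hs hinv hFGmain half.length 0 (by omega)
      simp only [List.take_zero, List.drop_zero] at hloop
      rw [show unusedL ([] : List Char) ([] : List Bool) = [] from rfl,
          List.getLast?_nil] at hloop
      rw [← hmdef] at hloop
      exact hloop

-- the items loop of A, characterised
lemma oddHalfA_eq (l : List (Char × Int)) :
    ∀ (o h : List Char),
    oddHalfA l o h =
      if 1 < (if o = [] then 0 else 1) + (l.filter (fun kv => decide (PySem.Int.mod kv.2 2 = 1))).length then none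
      else some (o ++ ((l.filter (fun kv => decide (PySem.Int.mod kv.2 2 = 1))).map Prod.fst).take 1,
                 h ++ l.flatMap (fun kv => PySem.List.pyRepeat [kv.1] (PySem.Int.floordiv kv.2 2))) := by
  induction l with
  | nil =>
    intro o h
    rw [if_neg (by split_ifs <;> simp)]
    simp [oddHalfA]
  | cons kv rest ih =>
    obtain ⟨k, v⟩ := kv
    intro o h
    simp only [oddHalfA]
    by_cases hp : PySem.Int.mod v 2 = 1
    · rw [if_pos hp, List.filter_cons_of_pos (by simpa using hp)]
      by_cases ho : o = []
      · subst ho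
        rw [if_neg (by simp)]
        rw [ih]
        rw [if_neg (show ([k] : List Char) ≠ [] by simp)]
        simp only [List.length_cons, reduceIte, Nat.zero_add]
        by_cases hcond : 1 < 1 + (rest.filter (fun kv => decide (PySem.Int.mod kv.2 2 = 1))).length
        · rw [if_pos hcond, if_pos (by omega)]
        · rw [if_neg hcond, if_neg (by omega)]
          have hnil : rest.filter (fun kv => decide (PySem.Int.mod kv.2 2 = 1)) = [] :=
            List.length_eq_zero_iff.mp (by omega)
          rw [hnil]
          simp [List.append_assoc]
      · rw [if_pos (by simpa using ho)]
        rw [if_pos (show 1 < (if o = [] then 0 else 1) +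
            ((k, v) :: rest.filter (fun kv => decide (PySem.Int.mod kv.2 2 = 1))).length by
          rw [if_neg ho]; simp only [List.length_cons]; omega)]
    · rw [if_neg hp, List.filter_cons_of_neg (by simpa using hp)]
      rw [ih]
      simp [List.append_assoc]

lemma getD_replicate_false (n j : Nat) : (List.replicate n false).getD j false = false := by
  by_cases hj : j < n
  · rw [List.getD_eq_getElem _ _ (by simpa using hj), List.getElem_replicate]
  · rw [List.getD_eq_default _ _ (by simpa using Nat.le_of_not_lt hj)]

-- ===== VERDICT (by name: the statement is the Claim_ definition above) =====
theorem all_palindromes_spec : Claim_equal_all_palindromes := by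
  unfold Claim_equal_all_palindromes Spec_all_palindromes
  intro s _
  simp only [all_palindromes, all_palindromes_alt]
  rw [oddHalfA_eq]
  simp only [reduceIte, Nat.zero_add, List.nil_append, List.length_map]
  by_cases hc : 1 < ((PySem.Dict.counter s.toList).items.filter
      (fun kv => decide (PySem.Int.mod kv.2 2 = 1))).length
  · rw [if_pos hc, if_pos hc]
  · rw [if_neg hc, if_neg hc]
    dsimp only
    set odd := (((PySem.Dict.counter s.toList).items.filter
        (fun kv => decide (PySem.Int.mod kv.2 2 = 1))).map Prod.fst).take 1 with hodd
    set half := PySem.List.sorted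
        ((PySem.Dict.counter s.toList).items.flatMap
          (fun kv => PySem.List.pyRepeat [kv.1] (PySem.Int.floordiv kv.2 2)))
        (fun c => c) false with hhalf
    have hs : half.Pairwise (· ≤ ·) := PySem.List.sorted_pairwise _ _
    have hmain := btA_eq_genB odd half.length half (List.replicate half.length false) []
      (half.length + 1) (half.length + 1)
      (by rw [unusedL_replicate_false]) hs (by simp)
      (by intro i j _ _ _ hu; rw [getD_replicate_false] at hu; cases hu)
      (by simp) (by omega) (by omega)
    rw [unusedL_replicate_false] at hmain
    rw [hmain]
    simp
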